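-- pv_equiv track=rewrite | github.com/aashishbagmar/New-Sentiment-Analysis | stock_info.py | infer_sector_from_industry
-- ===== SOURCE A (Python) =====
-- def infer_sector_from_industry(industry: str) -> str:
--     """
--     Infer sector from industry when sector information is not available
--     """
--     industry_lower = industry.lower()
--
--     # Technology sectors
--     if any(keyword in industry_lower for keyword in ['software', 'technology', 'internet', 'computer', 'semiconductor', 'electronics']):
--         return 'Technology'
--
--     # Financial sectors
--     elif any(keyword in industry_lower for keyword in ['bank', 'financial', 'insurance', 'credit', 'investment']):
--         return 'Financial Services'
--
--     # Healthcare sectors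
--     elif any(keyword in industry_lower for keyword in ['pharmaceutical', 'biotechnology', 'medical', 'healthcare', 'drug']):
--         return 'Healthcare'
--
--     # Energy sectors
--     elif any(keyword in industry_lower for keyword in ['oil', 'gas', 'energy', 'petroleum', 'renewable']):
--         return 'Energy'
--
--     # Consumer sectors
--     elif any(keyword in industry_lower for keyword in ['retail', 'consumer', 'food', 'beverage', 'restaurant']):
--         return 'Consumer Cyclical'
--
--     # Industrial sectors
--     elif any(keyword in industry_lower for keyword in ['manufacturing', 'industrial', 'aerospace', 'defense', 'transportation']):
--         return 'Industrials'
--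
--     # Real Estate
--     elif any(keyword in industry_lower for keyword in ['real estate', 'property', 'reit']):
--         return 'Real Estate'
--
--     # Utilities
--     elif any(keyword in industry_lower for keyword in ['utility', 'utilities', 'electric', 'water', 'power']):
--         return 'Utilities'
--
--     # Materials
--     elif any(keyword in industry_lower for keyword in ['mining', 'materials', 'chemicals', 'steel', 'aluminum']):
--         return 'Basic Materials'
--
--     else:
--         return 'Unknown'
-- ===== SOURCE B (Python) =====
-- # Different algorithm: instead of testing each keyword group for containment, scan the
-- # lowered text position by position, collect the priorities of every keyword that starts
-- # at some position (flat keyword->priority map), and return the sector of the minimum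
-- # matched priority.  Correct because A returns the first group (in ladder order) that
-- # contains any matching keyword, i.e. the minimum priority among all matching keywords.
-- SECTOR_NAMES = ['Technology', 'Financial Services', 'Healthcare', 'Energy',
--                 'Consumer Cyclical', 'Industrials', 'Real Estate', 'Utilities',
--                 'Basic Materials']
--
-- KEYWORD_PRIORITY = {
--     'software': 0, 'technology': 0, 'internet': 0, 'computer': 0, 'semiconductor': 0, 'electronics': 0,
--     'bank': 1, 'financial': 1, 'insurance': 1, 'credit': 1, 'investment': 1,
--     'pharmaceutical': 2, 'biotechnology': 2, 'medical': 2, 'healthcare': 2, 'drug': 2,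
--     'oil': 3, 'gas': 3, 'energy': 3, 'petroleum': 3, 'renewable': 3,
--     'retail': 4, 'consumer': 4, 'food': 4, 'beverage': 4, 'restaurant': 4,
--     'manufacturing': 5, 'industrial': 5, 'aerospace': 5, 'defense': 5, 'transportation': 5,
--     'real estate': 6, 'property': 6, 'reit': 6,
--     'utility': 7, 'utilities': 7, 'electric': 7, 'water': 7, 'power': 7,
--     'mining': 8, 'materials': 8, 'chemicals': 8, 'steel': 8, 'aluminum': 8,
-- }
--
-- def infer_sector_from_industry(industry: str) -> str:
--     s = industry.lower()
--     matched = set()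
--     for i in range(len(s)):
--         for kw, pri in KEYWORD_PRIORITY.items():
--             if s.startswith(kw, i):
--                 matched.add(pri)
--     return SECTOR_NAMES[min(matched)] if matched else 'Unknown'
-- ===== Notes on version B (the rewrite author's own statement) =====
-- stated objective: alternative
-- what changed: Replaces A's if/elif ladder of per-group containment tests with a single position-by-position scan of the lowered text against a flat keyword->priority map, collecting matched priorities into a set and returning the sector of the minimum priority (Unknown if empty).
import Mathlib
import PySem

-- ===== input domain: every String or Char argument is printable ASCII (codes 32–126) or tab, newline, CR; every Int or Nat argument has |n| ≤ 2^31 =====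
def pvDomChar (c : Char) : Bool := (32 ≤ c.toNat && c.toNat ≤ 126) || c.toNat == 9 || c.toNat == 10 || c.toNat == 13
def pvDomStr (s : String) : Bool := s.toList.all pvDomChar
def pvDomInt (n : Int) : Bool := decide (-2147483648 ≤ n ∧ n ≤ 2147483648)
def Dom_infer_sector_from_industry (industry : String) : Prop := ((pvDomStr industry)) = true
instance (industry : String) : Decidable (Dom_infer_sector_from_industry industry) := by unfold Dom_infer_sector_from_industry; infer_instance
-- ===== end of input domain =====

-- B replaces A's if/elif ladder of per-group containment tests with a position-by-position
-- scan of the lowered text against a flat keyword→priority map, returning the sector of the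
-- minimum matched priority; objective: alternative (same asymptotic cost).

-- ===== PORT A =====
def infer_sector_from_industry (industry : String) : String :=
  let industry_lower := PySem.Str.lower industry
  if ["software", "technology", "internet", "computer", "semiconductor", "electronics"].any (fun k => PySem.Str.isIn k industry_lower) then "Technology"
  else if ["bank", "financial", "insurance", "credit", "investment"].any (fun k => PySem.Str.isIn k industry_lower) then "Financial Services"
  else if ["pharmaceutical", "biotechnology", "medical", "healthcare", "drug"].any (fun k => PySem.Str.isIn k industry_lower) then "Healthcare"
  else if ["oil", "gas", "energy", "petroleum", "renewable"].any (fun k => PySem.Str.isIn k industry_lower) then "Energy"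
  else if ["retail", "consumer", "food", "beverage", "restaurant"].any (fun k => PySem.Str.isIn k industry_lower) then "Consumer Cyclical"
  else if ["manufacturing", "industrial", "aerospace", "defense", "transportation"].any (fun k => PySem.Str.isIn k industry_lower) then "Industrials"
  else if ["real estate", "property", "reit"].any (fun k => PySem.Str.isIn k industry_lower) then "Real Estate"
  else if ["utility", "utilities", "electric", "water", "power"].any (fun k => PySem.Str.isIn k industry_lower) then "Utilities"
  else if ["mining", "materials", "chemicals", "steel", "aluminum"].any (fun k => PySem.Str.isIn k industry_lower) then "Basic Materials"
  else "Unknown"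

-- ===== PORT B =====
-- SECTOR_NAMES
def pvSectorNames : List String :=
  ["Technology", "Financial Services", "Healthcare", "Energy", "Consumer Cyclical",
   "Industrials", "Real Estate", "Utilities", "Basic Materials"]

-- KEYWORD_PRIORITY (a dict of distinct keys → association list in insertion order)
def pvKeywordPriority : List (String × Nat) :=
  [("software", 0), ("technology", 0), ("internet", 0), ("computer", 0), ("semiconductor", 0), ("electronics", 0),
   ("bank", 1), ("financial", 1), ("insurance", 1), ("credit", 1), ("investment", 1),
   ("pharmaceutical", 2), ("biotechnology", 2), ("medical", 2), ("healthcare", 2), ("drug", 2),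
   ("oil", 3), ("gas", 3), ("energy", 3), ("petroleum", 3), ("renewable", 3),
   ("retail", 4), ("consumer", 4), ("food", 4), ("beverage", 4), ("restaurant", 4),
   ("manufacturing", 5), ("industrial", 5), ("aerospace", 5), ("defense", 5), ("transportation", 5),
   ("real estate", 6), ("property", 6), ("reit", 6),
   ("utility", 7), ("utilities", 7), ("electric", 7), ("water", 7), ("power", 7),
   ("mining", 8), ("materials", 8), ("chemicals", 8), ("steel", 8), ("aluminum", 8)]

-- the two nested for-loops of Source B: scan all positions i, add the priority of every
-- keyword that starts at i (s.startswith(kw, i) = kw is a prefix of s[i:]).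
def pvMatched (cs : List Char) : PySem.Set Nat :=
  (List.range cs.length).foldl (fun acc i =>
    pvKeywordPriority.foldl (fun acc e =>
      if PySem.Chars.startswith (cs.drop i) e.1.toList then PySem.Set.add acc e.2 else acc) acc)
    ([] : PySem.Set Nat)

def infer_sector_from_industry_alt (industry : String) : String :=
  let matched := pvMatched (PySem.Str.lower industry).toList
  match PySem.List.min? matched (fun x => x) with
  | some m => (PySem.List.pyGet? pvSectorNames (m : Int)).getD "Unknown"  -- m ≤ 8, always in range
  | none => "Unknown"

-- ===== PRECONDITION & SPEC =====
def Spec_infer_sector_from_industry (industry : String) (out : String) : Prop := out = infer_sector_from_industry_alt industry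
instance (industry : String) (out : String) : Decidable (Spec_infer_sector_from_industry industry out) := by unfold Spec_infer_sector_from_industry; infer_instance

-- ===== CLAIM (what is proved, stated in full; the proofs are below) =====
def Claim_equal_infer_sector_from_industry : Prop := ∀ (industry : String), Dom_infer_sector_from_industry industry → Spec_infer_sector_from_industry industry (infer_sector_from_industry industry)

-- ===== LEMMAS AND PROOFS =====

-- keyword groups of A's ladder, indexed by priority (proof-side only)
def pvGroup : Nat → List String
  | 0 => ["software", "technology", "internet", "computer", "semiconductor", "electronics"]
  | 1 => ["bank", "financial", "insurance", "credit", "investment"]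
  | 2 => ["pharmaceutical", "biotechnology", "medical", "healthcare", "drug"]
  | 3 => ["oil", "gas", "energy", "petroleum", "renewable"]
  | 4 => ["retail", "consumer", "food", "beverage", "restaurant"]
  | 5 => ["manufacturing", "industrial", "aerospace", "defense", "transportation"]
  | 6 => ["real estate", "property", "reit"]
  | 7 => ["utility", "utilities", "electric", "water", "power"]
  | 8 => ["mining", "materials", "chemicals", "steel", "aluminum"]
  | _ => []

def pvCond (g : Nat) (cs : List Char) : Bool :=
  (pvGroup g).any (fun k => PySem.Chars.isIn k.toList cs)

def pvLadder (cs : List Char) : String :=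
  if pvCond 0 cs then "Technology"
  else if pvCond 1 cs then "Financial Services"
  else if pvCond 2 cs then "Healthcare"
  else if pvCond 3 cs then "Energy"
  else if pvCond 4 cs then "Consumer Cyclical"
  else if pvCond 5 cs then "Industrials"
  else if pvCond 6 cs then "Real Estate"
  else if pvCond 7 cs then "Utilities"
  else if pvCond 8 cs then "Basic Materials"
  else "Unknown"

lemma pv_mem_inner (cs : List Char) (i : Nat) (L : List (String × Nat)) (acc : PySem.Set Nat) (x : Nat) :
    x ∈ L.foldl (fun acc e =>
      if PySem.Chars.startswith (cs.drop i) e.1.toList then PySem.Set.add acc e.2 else acc) acc ↔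
    x ∈ acc ∨ ∃ e ∈ L, PySem.Chars.startswith (cs.drop i) e.1.toList = true ∧ e.2 = x := by
  induction L generalizing acc with
  | nil => simp
  | cons e t ih =>
    simp only [List.foldl_cons, List.mem_cons]
    rw [ih]
    by_cases h : PySem.Chars.startswith (cs.drop i) e.1.toList = true
    · simp [h, PySem.Set.mem_add]; try tauto
    · simp [h]; try tauto

lemma pv_mem_outer (cs : List Char) (l : List Nat) (acc : PySem.Set Nat) (x : Nat) :
    x ∈ l.foldl (fun acc i =>
      pvKeywordPriority.foldl (fun acc e =>
        if PySem.Chars.startswith (cs.drop i) e.1.toList then PySem.Set.add acc e.2 else acc) acc) acc ↔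
    x ∈ acc ∨ ∃ i ∈ l, ∃ e ∈ pvKeywordPriority,
      PySem.Chars.startswith (cs.drop i) e.1.toList = true ∧ e.2 = x := by
  induction l generalizing acc with
  | nil => simp
  | cons j t ih =>
    simp only [List.foldl_cons, List.mem_cons]
    rw [ih, pv_mem_inner]
    aesop

lemma pv_range_startswith_iff (cs : List Char) (kw : List Char) (h : kw ≠ []) :
    (∃ i ∈ List.range cs.length, PySem.Chars.startswith (cs.drop i) kw = true) ↔
    PySem.Chars.isIn kw cs = true := by
  rw [← PySem.Chars.exists_prefix_drop_iff_isIn]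
  constructor
  · rintro ⟨i, _, hs⟩
    exact ⟨i, (PySem.Chars.startswith_iff _ _).1 hs⟩
  · rintro ⟨j, hj⟩
    by_cases hlt : j < cs.length
    · exact ⟨j, List.mem_range.2 hlt, (PySem.Chars.startswith_iff _ _).2 hj⟩
    · exfalso
      have : List.drop j cs = [] := List.drop_eq_nil_of_le (by omega)
      rw [this] at hj
      exact h (List.prefix_nil.1 hj)

lemma pv_mem_matched (cs : List Char) (x : Nat) :
    x ∈ pvMatched cs ↔
    ∃ e ∈ pvKeywordPriority, PySem.Chars.isIn e.1.toList cs = true ∧ e.2 = x := by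
  unfold pvMatched
  rw [pv_mem_outer]
  simp only [List.not_mem_nil, false_or]
  constructor
  · rintro ⟨i, hi, e, he, hs, hx⟩
    refine ⟨e, he, ?_, hx⟩
    have hne : e.1.toList ≠ [] := by
      fin_cases he <;> simp
    exact (pv_range_startswith_iff cs e.1.toList hne).1 ⟨i, hi, hs⟩
  · rintro ⟨e, he, hin, hx⟩
    have hne : e.1.toList ≠ [] := by
      fin_cases he <;> simp
    obtain ⟨i, hi, hs⟩ := (pv_range_startswith_iff cs e.1.toList hne).2 hin
    exact ⟨i, hi, e, he, hs, hx⟩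

lemma pv_mem_matched_iff_cond (cs : List Char) (x : Nat) :
    x ∈ pvMatched cs ↔ pvCond x cs = true := by
  rw [pv_mem_matched]
  match x with
  | 0 | 1 | 2 | 3 | 4 | 5 | 6 | 7 | 8 =>
    simp [pvKeywordPriority, pvCond, pvGroup]; try tauto
  | n + 9 =>
    simp only [pvCond, pvGroup, List.any_nil]
    constructor
    · rintro ⟨e, he, _, hx⟩
      exfalso; fin_cases he <;> omega
    · intro h; cases h

lemma pv_cond_le8 (cs : List Char) (x : Nat) (h : pvCond x cs = true) : x ≤ 8 := by
  by_contra hx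
  have h9 : ∃ n, x = n + 9 := ⟨x - 9, by omega⟩
  obtain ⟨n, rfl⟩ := h9
  simp [pvCond, pvGroup] at h

lemma pv_min_branch (cs : List Char) (g : Nat) (hg : pvCond g cs = true)
    (hlt : ∀ j, j < g → pvCond j cs = false) :
    PySem.List.min? (pvMatched cs) (fun x => x) = some g := by
  have hgm : g ∈ pvMatched cs := (pv_mem_matched_iff_cond cs g).2 hg
  cases hq : PySem.List.min? (pvMatched cs) (fun x => x) with
  | none =>
    rw [PySem.List.min?_eq_none_iff] at hq
    rw [hq] at hgm; cases hgm
  | some m =>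
    have hmm : m ∈ pvMatched cs := PySem.List.min?_mem hq
    have hmc : pvCond m cs = true := (pv_mem_matched_iff_cond cs m).1 hmm
    have h1 : m ≤ g := PySem.List.min?_isMin hq g hgm
    have h2 : g ≤ m := by
      by_contra hc
      have := hlt m (by omega)
      rw [this] at hmc; cases hmc
    have : m = g := by omega
    rw [this]

lemma pv_body_eq_ladder (cs : List Char) :
    (match PySem.List.min? (pvMatched cs) (fun x => x) with
     | some m => (PySem.List.pyGet? pvSectorNames (m : Int)).getD "Unknown"
     | none => "Unknown") = pvLadder cs := by
  unfold pvLadder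
  by_cases h0 : pvCond 0 cs = true
  · rw [pv_min_branch cs 0 h0 (by omega)]; simp [h0]; decide
  · by_cases h1 : pvCond 1 cs = true
    · rw [pv_min_branch cs 1 h1 (by intro j hj; interval_cases j; simp_all)]
      simp [h0, h1]; decide
    · by_cases h2 : pvCond 2 cs = true
      · rw [pv_min_branch cs 2 h2 (by intro j hj; interval_cases j <;> simp_all)]
        simp [h0, h1, h2]; decide
      · by_cases h3 : pvCond 3 cs = true
        · rw [pv_min_branch cs 3 h3 (by intro j hj; interval_cases j <;> simp_all)]
          simp [h0, h1, h2, h3]; decide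
        · by_cases h4 : pvCond 4 cs = true
          · rw [pv_min_branch cs 4 h4 (by intro j hj; interval_cases j <;> simp_all)]
            simp [h0, h1, h2, h3, h4]; decide
          · by_cases h5 : pvCond 5 cs = true
            · rw [pv_min_branch cs 5 h5 (by intro j hj; interval_cases j <;> simp_all)]
              simp [h0, h1, h2, h3, h4, h5]; decide
            · by_cases h6 : pvCond 6 cs = true
              · rw [pv_min_branch cs 6 h6 (by intro j hj; interval_cases j <;> simp_all)]
                simp [h0, h1, h2, h3, h4, h5, h6]; decide
              · by_cases h7 : pvCond 7 cs = true
                · rw [pv_min_branch cs 7 h7 (by intro j hj; interval_cases j <;> simp_all)]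
                  simp [h0, h1, h2, h3, h4, h5, h6, h7]; decide
                · by_cases h8 : pvCond 8 cs = true
                  · rw [pv_min_branch cs 8 h8 (by intro j hj; interval_cases j <;> simp_all)]
                    simp [h0, h1, h2, h3, h4, h5, h6, h7, h8]; decide
                  · have hnil : pvMatched cs = [] := by
                      rw [List.eq_nil_iff_forall_not_mem]
                      intro x hx
                      have hc := (pv_mem_matched_iff_cond cs x).1 hx
                      have h8le := pv_cond_le8 cs x hc
                      interval_cases x <;> simp_all
                    rw [show PySem.List.min? (pvMatched cs) (fun x => x) = none from
                          (PySem.List.min?_eq_none_iff _ _).2 hnil]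
                    simp [h0, h1, h2, h3, h4, h5, h6, h7, h8]

lemma pv_A_eq_ladder (industry : String) :
    infer_sector_from_industry industry = pvLadder (PySem.Str.lower industry).toList := rfl

-- ===== VERDICT (by name: the statement is the Claim_ definition above) =====
theorem infer_sector_from_industry_spec : Claim_equal_infer_sector_from_industry := by
  intro industry _
  show infer_sector_from_industry industry = infer_sector_from_industry_alt industry
  rw [pv_A_eq_ladder]
  unfold infer_sector_from_industry_alt
  rw [← pv_body_eq_ladder]
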